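-- pv_equiv track=rewrite | github.com/smullins7/advent-of-code | 2021/day_22.py | part_two
-- ===== SOURCE A (Python) =====
-- from dataclasses import dataclass
--
-- @dataclass(unsafe_hash=True)
-- class CubeRange:
--     is_on: bool
--     min_x: int
--     max_x: int
--     min_y: int
--     max_y: int
--     min_z: int
--     max_z: int
--
--     def overlap(self, other):
--         min_x, max_x = max(self.min_x, other.min_x), min(self.max_x, other.max_x)
--         min_y, max_y = max(self.min_y, other.min_y), min(self.max_y, other.max_y)
--         min_z, max_z = max(self.min_z, other.min_z), min(self.max_z, other.max_z)
--         if max_x >= min_x and max_y >= min_y and max_z >= min_z: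
--             return CubeRange(self._is_overlap_on(other), min_x, max_x, min_y, max_y, min_z, max_z)
--
--     def _is_overlap_on(self, other):
--         if self.is_on and other.is_on:
--             return False
--         return (not self.is_on and not other.is_on) or other.is_on
--
--     def size(self) -> int:
--         val = (self.max_x - self.min_x + 1) * (self.max_y - self.min_y + 1) * (self.max_z - self.min_z + 1)
--         return val if self.is_on else -val
--
-- def part_two(data):
--     """
--     first attempt....
--     on_ranges = set()
--     blah = set()
--     for (is_on, ranges) in data:
--         x_r, y_r, z_r = ranges
--         cube_range = CubeRange(x_r[0], x_r[1], y_r[0], y_r[1], z_r[0], z_r[1])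
--         for overlapping_range in find_overlaps(on_ranges, cube_range):
--             blah.add(overlapping_range)
--         if is_on:
--             on_ranges.add(cube_range)
--
--     return sum([r.size() for r in on_ranges]) - sum([r.size() for r in blah])
--     """
--     """
--     second attempt...
--     total_size = 0
--     prev = []
--     for (is_on, ranges) in data:
--         x_r, y_r, z_r = ranges
--         cube_range = CubeRange(x_r[0], x_r[1], y_r[0], y_r[1], z_r[0], z_r[1])
--         for prev_cube in prev:
--             overlap = prev_cube.overlap(cube_range)
--             if overlap:
--                 total_size -= overlap.size()
--         if is_on:
--             prev.append(cube_range)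
--             total_size += cube_range.size()
--     return total_size
--     """
--     on_ranges = []
--     for (is_on, ranges) in data:
--         x_r, y_r, z_r = ranges
--         cube_range = CubeRange(is_on, x_r[0], x_r[1], y_r[0], y_r[1], z_r[0], z_r[1])
--         to_add = []
--         for prev_cube in on_ranges:
--             overlap = prev_cube.overlap(cube_range)
--             if overlap:
--                 to_add.append(overlap)
--
--         on_ranges.extend(to_add)
--         if is_on:
--             on_ranges.append(cube_range)
--
--     return sum([r.size() for r in on_ranges])
-- ===== SOURCE B (Python) =====
-- def _inter(cur, box):
--     lo_x, hi_x = max(cur[0], box[0]), min(cur[1], box[1])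
--     lo_y, hi_y = max(cur[2], box[2]), min(cur[3], box[3])
--     lo_z, hi_z = max(cur[4], box[4]), min(cur[5], box[5])
--     if hi_x >= lo_x and hi_y >= lo_y and hi_z >= lo_z:
--         return (lo_x, hi_x, lo_y, hi_y, lo_z, hi_z)
--     return None
--
-- def _vol(b):
--     return (b[1] - b[0] + 1) * (b[3] - b[2] + 1) * (b[5] - b[4] + 1)
--
-- def _solve(cur, rest):
--     # net contribution of the region `cur`: its volume minus whatever the later
--     # instructions `rest` (on or off alike) re-decide inside it; pure top-down
--     # recursion on suffixes, no stored collection of signed cuboids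
--     total = _vol(cur)
--     for j in range(len(rest)):
--         ib = _inter(cur, rest[j][1])
--         if ib is not None:
--             total -= _solve(ib, rest[j + 1:])
--     return total
--
-- def part_two(data):
--     boxes = [(is_on, (x[0], x[1], y[0], y[1], z[0], z[1]))
--              for (is_on, (x, y, z)) in data]
--     total = 0
--     for i in range(len(boxes)):
--         if boxes[i][0]:
--             total += _solve(boxes[i][1], boxes[i + 1:])
--     return total
-- ===== Notes on version B (the rewrite author's own statement) =====
-- stated objective: alternative
-- what changed: B keeps no collection of signed cuboids at all: instead of A's forward pass that materializes an ever-growing list of sign-flipped overlap CubeRanges and sums their sizes at the end, B computes for each 'on' instruction its net contribution by a top-down recursion over the suffix of later instructions (volume minus recursively-discounted re-decided intersections), so the state A stores as data becomes B's call structure.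
import Mathlib
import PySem

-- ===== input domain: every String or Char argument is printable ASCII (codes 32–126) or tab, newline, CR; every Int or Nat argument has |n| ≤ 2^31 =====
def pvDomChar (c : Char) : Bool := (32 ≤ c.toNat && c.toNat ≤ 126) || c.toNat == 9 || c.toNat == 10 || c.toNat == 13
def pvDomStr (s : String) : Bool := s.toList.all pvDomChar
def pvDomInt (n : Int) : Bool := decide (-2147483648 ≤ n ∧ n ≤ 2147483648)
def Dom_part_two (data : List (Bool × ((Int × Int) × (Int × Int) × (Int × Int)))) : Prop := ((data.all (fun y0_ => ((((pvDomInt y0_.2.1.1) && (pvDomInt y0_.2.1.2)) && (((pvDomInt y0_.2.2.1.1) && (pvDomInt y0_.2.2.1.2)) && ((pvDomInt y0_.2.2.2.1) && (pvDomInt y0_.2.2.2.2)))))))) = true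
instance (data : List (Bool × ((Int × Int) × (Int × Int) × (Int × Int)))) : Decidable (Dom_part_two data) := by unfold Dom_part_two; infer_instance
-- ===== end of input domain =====

-- B replaces A's materialized list of sign-flipped overlap cuboids by a top-down recursion
-- over instruction suffixes (volume minus re-decided intersections); same return value.


-- ===== PORT A =====
structure CubeRange where
  is_on : Bool
  min_x : Int
  max_x : Int
  min_y : Int
  max_y : Int
  min_z : Int
  max_z : Int
deriving DecidableEq, Repr

def pvIsOverlapOn (s o : CubeRange) : Bool :=
  if s.is_on && o.is_on then false
  else (!s.is_on && !o.is_on) || o.is_on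

def pvOverlap (s o : CubeRange) : Option CubeRange :=
  let min_x := max s.min_x o.min_x
  let max_x := min s.max_x o.max_x
  let min_y := max s.min_y o.min_y
  let max_y := min s.max_y o.max_y
  let min_z := max s.min_z o.min_z
  let max_z := min s.max_z o.max_z
  if max_x ≥ min_x && max_y ≥ min_y && max_z ≥ min_z then
    some ⟨pvIsOverlapOn s o, min_x, max_x, min_y, max_y, min_z, max_z⟩
  else
    none

def pvSize (r : CubeRange) : Int :=
  let val := (r.max_x - r.min_x + 1) * (r.max_y - r.min_y + 1) * (r.max_z - r.min_z + 1)
  if r.is_on then val else -val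

def pvStepA (on_ranges : List CubeRange)
    (entry : Bool × ((Int × Int) × (Int × Int) × (Int × Int))) : List CubeRange :=
  let cube : CubeRange := ⟨entry.1, entry.2.1.1, entry.2.1.2, entry.2.2.1.1, entry.2.2.1.2,
    entry.2.2.2.1, entry.2.2.2.2⟩
  let to_add := on_ranges.foldl (fun acc prev =>
    match pvOverlap prev cube with
    | some o => acc ++ [o]
    | none => acc) []
  let on_ranges := on_ranges ++ to_add
  if entry.1 then on_ranges ++ [cube] else on_ranges

def part_two (data : List (Bool × ((Int × Int) × (Int × Int) × (Int × Int)))) : Int :=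
  ((data.foldl pvStepA []).map pvSize).sum

-- ===== PORT B =====
abbrev PVBox := Int × Int × Int × Int × Int × Int

def pvInter (cur box : PVBox) : Option PVBox :=
  let lo_x := max cur.1 box.1
  let hi_x := min cur.2.1 box.2.1
  let lo_y := max cur.2.2.1 box.2.2.1
  let hi_y := min cur.2.2.2.1 box.2.2.2.1
  let lo_z := max cur.2.2.2.2.1 box.2.2.2.2.1
  let hi_z := min cur.2.2.2.2.2 box.2.2.2.2.2
  if hi_x ≥ lo_x && hi_y ≥ lo_y && hi_z ≥ lo_z then
    some (lo_x, hi_x, lo_y, hi_y, lo_z, hi_z)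
  else
    none

def pvVol (b : PVBox) : Int :=
  (b.2.1 - b.1 + 1) * (b.2.2.2.1 - b.2.2.1 + 1) * (b.2.2.2.2.2 - b.2.2.2.2.1 + 1)

mutual
-- _solve: vol(cur) minus the recursively-discounted contributions over the suffix
def pvSolve (cur : PVBox) (rest : List (Bool × PVBox)) : Int :=
  pvVol cur - pvSub cur rest
  termination_by (rest.length, 1)
-- the subtraction loop of _solve, as structural recursion on the suffix
def pvSub (cur : PVBox) (rest : List (Bool × PVBox)) : Int :=
  match rest with
  | [] => 0
  | e :: tl =>
    (match pvInter cur e.2 with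
     | some ib => pvSolve ib tl
     | none => 0) + pvSub cur tl
  termination_by (rest.length, 0)
end

-- the top-level accumulation loop of part_two (B)
def pvTop : List (Bool × PVBox) → Int
  | [] => 0
  | e :: tl => (if e.1 then pvSolve e.2 tl else 0) + pvTop tl

def pvToBox (e : Bool × ((Int × Int) × (Int × Int) × (Int × Int))) : Bool × PVBox :=
  (e.1, (e.2.1.1, e.2.1.2, e.2.2.1.1, e.2.2.1.2, e.2.2.2.1, e.2.2.2.2))

def part_two_alt (data : List (Bool × ((Int × Int) × (Int × Int) × (Int × Int)))) : Int :=
  pvTop (data.map pvToBox)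

-- ===== PRECONDITION & SPEC =====
def Spec_part_two (data : List (Bool × ((Int × Int) × (Int × Int) × (Int × Int)))) (out : Int) : Prop := out = part_two_alt data
instance (data : List (Bool × ((Int × Int) × (Int × Int) × (Int × Int)))) (out : Int) : Decidable (Spec_part_two data out) := by unfold Spec_part_two; infer_instance

-- ===== CLAIM (what is proved, stated in full; the proofs are below) =====
def Claim_equal_part_two : Prop := ∀ (data : List (Bool × ((Int × Int) × (Int × Int) × (Int × Int)))), Dom_part_two data → Spec_part_two data (part_two data)

-- ===== LEMMAS AND PROOFS =====

-- the geometry of a cuboid, forgetting its sign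
def pvKey (e : CubeRange) : PVBox := (e.min_x, e.max_x, e.min_y, e.max_y, e.min_z, e.max_z)

def pvSgn (e : CubeRange) : Int := if e.is_on then 1 else -1

def pvMk (s : Bool) (b : PVBox) : CubeRange :=
  ⟨s, b.1, b.2.1, b.2.2.1, b.2.2.2.1, b.2.2.2.2.1, b.2.2.2.2.2⟩

theorem pvSize_eq (e : CubeRange) : pvSize e = pvSgn e * pvVol (pvKey e) := by
  cases h : e.is_on <;> simp [pvSize, pvSgn, pvVol, pvKey, h]

-- A's overlap is the geometric intersection with the sign of prev flipped
theorem pvOverlap_eq (prev cube : CubeRange) :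
    pvOverlap prev cube = (pvInter (pvKey prev) (pvKey cube)).map (pvMk (!prev.is_on)) := by
  have hsgn : pvIsOverlapOn prev cube = !prev.is_on := by
    cases h1 : prev.is_on <;> cases h2 : cube.is_on <;> simp [pvIsOverlapOn, h1, h2]
  simp only [pvOverlap, pvInter, pvKey, hsgn]
  split <;> simp_all [pvMk]

-- A's inner loop collecting overlaps is a filterMap of geometric intersections
theorem pvToAdd (cube : CubeRange) (l : List CubeRange) (acc : List CubeRange) :
    l.foldl (fun acc prev =>
        match pvOverlap prev cube with
        | some o => acc ++ [o]
        | none => acc) acc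
      = acc ++ l.filterMap (fun prev =>
          (pvInter (pvKey prev) (pvKey cube)).map (pvMk (!prev.is_on))) := by
  induction l generalizing acc with
  | nil => simp
  | cons prev l ih =>
    rw [List.foldl_cons, List.filterMap_cons, ih, pvOverlap_eq]
    cases h : pvInter (pvKey prev) (pvKey cube) with
    | none => simp
    | some ib => simp

-- unfolding pvSolve one suffix step
theorem pvSolve_cons (cur : PVBox) (e : Bool × PVBox) (tl : List (Bool × PVBox)) :
    pvSolve cur (e :: tl)
      = pvSolve cur tl - (match pvInter cur e.2 with
          | some ib => pvSolve ib tl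
          | none => 0) := by
  simp only [pvSolve, pvSub]
  ring

-- summing over the produced overlap cuboids, expressed over the source list
theorem pvSum_filterMap (b : PVBox) (l : List CubeRange) (F : CubeRange → Int) :
    ((l.filterMap (fun prev => (pvInter (pvKey prev) b).map (pvMk (!prev.is_on)))).map F).sum
      = (l.map (fun r => match pvInter (pvKey r) b with
          | some ib => F (pvMk (!r.is_on) ib)
          | none => 0)).sum := by
  induction l with
  | nil => simp
  | cons r l ih =>
    cases h : pvInter (pvKey r) b with
    | none => simp [h, ih]
    | some ib => simp [h, ih]

-- master invariant: A's running list against B's recursion over the remaining data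
theorem pvMaster (ds : List (Bool × ((Int × Int) × (Int × Int) × (Int × Int)))) :
    ∀ (L : List CubeRange),
      (((ds.foldl pvStepA L).map pvSize).sum)
        = (L.map (fun r => pvSgn r * pvSolve (pvKey r) (ds.map pvToBox))).sum
          + pvTop (ds.map pvToBox) := by
  induction ds with
  | nil =>
    intro L
    simp [pvTop, pvSolve, pvSub]
    exact congrArg _ (List.map_congr_left (fun r _ => pvSize_eq r))
  | cons e ds ih =>
    intro L
    obtain ⟨on, ⟨⟨x0, x1⟩, ⟨y0, y1⟩, ⟨z0, z1⟩⟩⟩ := e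
    set b : PVBox := (x0, x1, y0, y1, z0, z1) with hb
    set bs := ds.map pvToBox with hbs
    have hcube : pvKey (⟨on, x0, x1, y0, y1, z0, z1⟩ : CubeRange) = b := rfl
    have hA : pvStepA L (on, ((x0, x1), (y0, y1), (z0, z1)))
        = (L ++ L.filterMap (fun prev =>
              (pvInter (pvKey prev) b).map (pvMk (!prev.is_on))))
          ++ (if on then [(⟨on, x0, x1, y0, y1, z0, z1⟩ : CubeRange)] else []) := by
      cases on <;> simp [pvStepA, pvToAdd, pvKey, hb]
    rw [List.foldl_cons, hA, ih]
    -- split the sums over the appended lists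
    rw [List.map_append, List.sum_append, List.map_append, List.sum_append]
    -- the overlaps' recursive sums, rewritten over L
    rw [pvSum_filterMap]
    have hL : (L.map (fun r => pvSgn r * pvSolve (pvKey r) bs)).sum
        + (L.map (fun r => match pvInter (pvKey r) b with
            | some ib => pvSgn (pvMk (!r.is_on) ib) * pvSolve (pvKey (pvMk (!r.is_on) ib)) bs
            | none => 0)).sum
        = (L.map (fun r => pvSgn r * pvSolve (pvKey r) ((on, b) :: bs))).sum := by
      rw [← List.sum_map_add]
      apply congrArg
      apply List.map_congr_left
      intro r _
      rw [pvSolve_cons]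
      cases h : pvInter (pvKey r) b with
      | none => ring
      | some ib =>
        have hk : pvKey (pvMk (!r.is_on) ib) = ib := rfl
        have hs : pvSgn (pvMk (!r.is_on) ib) = -pvSgn r := by
          cases hr : r.is_on <;> simp [pvSgn, pvMk, hr]
        simp only [hk, hs]
        ring
    have htail : ((if on then [(⟨on, x0, x1, y0, y1, z0, z1⟩ : CubeRange)] else []).map
          (fun r => pvSgn r * pvSolve (pvKey r) bs)).sum
        + pvTop bs
        = pvTop ((on, b) :: bs) := by
      cases on <;> simp [pvTop, pvSgn, hcube]
    have hconv : ((on, ((x0, x1), (y0, y1), (z0, z1))) ::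
        ds).map pvToBox = (on, b) :: bs := by simp [pvToBox, hb, hbs]
    rw [hconv]
    rw [← hL, ← htail]
    ring

-- ===== VERDICT (by name: the statement is the Claim_ definition above) =====
theorem part_two_spec : Claim_equal_part_two := by
  intro data _
  unfold Spec_part_two part_two part_two_alt
  rw [pvMaster data []]
  simp
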